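-- pv_equiv track=rewrite | github.com/NguyenPhamCode4You/ai-home-lab-docker-compose | scripts/codocu/agents/RagKnowledgeBase.py | RemoveExcessiveSpacing
-- ===== SOURCE A (Python) =====
-- def RemoveExcessiveSpacing(text):
--     while "  " in text:
--         text = text.replace("  ", " ")
--     while "\n\n" in text:
--         text = text.replace("\n\n", "\n")
--     while "...." in text:
--         text = text.replace("....", "")
--     while "----" in text:
--         text = text.replace("----", "")
--     return text
-- ===== SOURCE B (Python) =====
-- def _collapse_runs(text, c):
--     # one left-to-right pass: drop a c that immediately follows another c
--     out = []
--     prev = False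
--     for ch in text:
--         if ch == c:
--             if not prev:
--                 out.append(ch)
--             prev = True
--         else:
--             out.append(ch)
--             prev = False
--     return ''.join(out)
--
--
-- def _drop_quads(text, c):
--     # one left-to-right pass with a run counter: each maximal run of n c's
--     # is emitted as n % 4 c's (the fixpoint of deleting 4-c groups)
--     out = []
--     k = 0
--     for ch in text:
--         if ch == c:
--             k += 1
--         else:
--             out.append(c * (k % 4))
--             out.append(ch)
--             k = 0
--     out.append(c * (k % 4))
--     return ''.join(out)
--
--
-- def RemoveExcessiveSpacing(text):
--     text = _collapse_runs(text, ' ')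
--     text = _collapse_runs(text, '\n')
--     text = _drop_quads(text, '.')
--     text = _drop_quads(text, '-')
--     return text
-- ===== Notes on version B (the rewrite author's own statement) =====
-- stated objective: alternative
-- what changed: Replaces the four replace-until-fixpoint while loops with four single left-to-right passes that maintain run state (a previous-char flag for space/newline collapsing, a run-length counter mod 4 for dot/dash deletion), computing each fixpoint in one linear scan.
import Mathlib
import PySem

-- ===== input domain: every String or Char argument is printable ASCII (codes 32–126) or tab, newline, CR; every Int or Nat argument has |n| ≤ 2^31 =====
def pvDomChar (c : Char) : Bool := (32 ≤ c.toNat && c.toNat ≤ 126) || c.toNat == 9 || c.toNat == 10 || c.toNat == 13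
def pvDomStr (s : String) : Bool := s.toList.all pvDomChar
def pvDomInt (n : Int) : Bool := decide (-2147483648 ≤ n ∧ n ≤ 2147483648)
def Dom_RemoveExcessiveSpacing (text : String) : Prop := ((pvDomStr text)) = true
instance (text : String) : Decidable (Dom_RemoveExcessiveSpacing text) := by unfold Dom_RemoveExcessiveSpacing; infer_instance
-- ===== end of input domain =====

-- B replaces A's four replace-until-fixpoint while loops by one linear run-tracking pass
-- per character class (alternative decomposition; same return value, no side effects).

-- ===== PORT A =====
-- `pvRep old new s` is Python's `s.replace(old, new)` for a non-empty `old`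
-- (one left-to-right non-overlapping replacement pass); it is proved equal to
-- PySem.Chars.replace below (pvReplace_eq_pvRep) and exists only so the
-- termination measure of the while loops can be stated.
def pvRep (old new : List Char) : List Char → List Char
  | [] => []
  | a :: t =>
    if old.isPrefixOf (a :: t) then new ++ pvRep old new (t.drop (old.length - 1))
    else a :: pvRep old new t
termination_by s => s.length
decreasing_by
  · simp only [List.length_drop, List.length_cons]; omega
  · simp

theorem pvRep_go_eq (old new : List Char) (hne : old ≠ []) :
    ∀ (fuel : Nat) (l acc : List Char), l.length ≤ fuel →
      PySem.Chars.replace.go old new fuel l acc = acc.reverse ++ pvRep old new l := by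
  intro fuel
  induction fuel with
  | zero =>
    intro l acc h
    have : l = [] := by cases l <;> simp_all
    subst this
    rw [PySem.Chars.replace.go.eq_def]
    simp [pvRep]
  | succ n ih =>
    intro l acc h
    cases l with
    | nil => rw [PySem.Chars.replace.go.eq_def]; simp [pvRep]
    | cons a t =>
      rw [PySem.Chars.replace.go.eq_def]
      by_cases hp : old.isPrefixOf (a :: t) = true
      · simp only [hp, if_true]
        have hdrop : List.drop old.length (a :: t) = t.drop (old.length - 1) := by
          cases old with
          | nil => exact absurd rfl hne
          | cons o os => simp
        have hlen : (t.drop (old.length - 1)).length ≤ n := by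
          simp only [List.length_drop]
          simp only [List.length_cons] at h
          omega
        rw [hdrop, ih _ _ hlen]
        simp [pvRep, hp]
      · simp only [hp]
        have hlen : t.length ≤ n := by simp only [List.length_cons] at h; omega
        rw [ih _ _ hlen]
        simp [pvRep, hp]

theorem pvReplace_eq_pvRep (old new s : List Char) (hne : old ≠ []) :
    PySem.Chars.replace s old new = pvRep old new s := by
  rw [PySem.Chars.replace]
  have : old.isEmpty = false := by cases old <;> simp_all
  rw [this]
  simpa using pvRep_go_eq old new hne s.length s [] le_rfl

theorem pvRep_length_le (old new : List Char) (hlt : new.length < old.length) :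
    ∀ (n : Nat) (s : List Char), s.length ≤ n → (pvRep old new s).length ≤ s.length := by
  intro n
  induction n with
  | zero =>
    intro s h
    have : s = [] := by cases s <;> simp_all
    subst this; simp [pvRep]
  | succ n ih =>
    intro s h
    cases s with
    | nil => simp [pvRep]
    | cons a t =>
      simp only [List.length_cons] at h
      by_cases hp : old.isPrefixOf (a :: t) = true
      · rw [pvRep, if_pos hp]
        have hpre : old <+: a :: t := List.isPrefixOf_iff_prefix.mp hp
        have holen : old.length ≤ t.length + 1 := by simpa using hpre.length_le
        have hd : (t.drop (old.length - 1)).length ≤ n := by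
          simp only [List.length_drop]; omega
        have := ih _ hd
        simp only [List.length_append, List.length_cons, List.length_drop] at *
        omega
      · rw [pvRep, if_neg hp]
        have := ih t (by omega)
        simp only [List.length_cons]
        omega

theorem pvRep_length_lt (old new : List Char) (hlt : new.length < old.length)
    (s : List Char) (hin : old <:+: s) : (pvRep old new s).length < s.length := by
  induction s with
  | nil =>
    exfalso
    have := hin.length_le
    simp at this
    have : old = [] := by cases old <;> simp_all
    subst this; simp at hlt
  | cons a t ih =>
    by_cases hp : old.isPrefixOf (a :: t) = true
    · rw [pvRep, if_pos hp]
      have hple := pvRep_length_le old new hlt (t.drop (old.length - 1)).length (t.drop (old.length - 1)) le_rfl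
      have hpre : old <+: a :: t := List.isPrefixOf_iff_prefix.mp hp
      have holen : old.length ≤ t.length + 1 := by simpa using hpre.length_le
      simp only [List.length_append, List.length_cons, List.length_drop] at *
      omega
    · rw [pvRep, if_neg hp]
      have : old <:+: t := by
        rcases List.infix_cons_iff.mp hin with h | h
        · exact absurd (List.isPrefixOf_iff_prefix.mpr h) hp
        · exact h
      simp only [List.length_cons]
      exact Nat.succ_lt_succ (ih this)

-- the Python while loop `while old in s: s = s.replace(old, new)` (new shorter than old)
def pvWhileReplace (old new : List Char) (hne : old ≠ []) (hlt : new.length < old.length)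
    (s : List Char) : List Char :=
  if h : PySem.Chars.isIn old s = true then
    pvWhileReplace old new hne hlt (PySem.Chars.replace s old new)
  else s
termination_by s.length
decreasing_by
  rw [pvReplace_eq_pvRep old new s hne]
  exact pvRep_length_lt old new hlt s ((PySem.Chars.isIn_iff_infix _ _).mp h)

def RemoveExcessiveSpacing (text : String) : String :=
  let t1 := pvWhileReplace [' ', ' '] [' '] (by simp) (by simp) text.toList
  let t2 := pvWhileReplace ['\n', '\n'] ['\n'] (by simp) (by simp) t1
  let t3 := pvWhileReplace ['.', '.', '.', '.'] [] (by simp) (by simp) t2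
  let t4 := pvWhileReplace ['-', '-', '-', '-'] [] (by simp) (by simp) t3
  String.ofList t4

-- ===== PORT B =====
-- Source B's _collapse_runs: one pass, drop a c that immediately follows another c
def pvCollapseGo (c : Char) (prev : Bool) : List Char → List Char
  | [] => []
  | a :: t =>
    if a = c then (if prev then pvCollapseGo c true t else a :: pvCollapseGo c true t)
    else a :: pvCollapseGo c false t

-- Source B's _drop_quads: one pass with a run counter, each run of n c's emits n % 4 c's
def pvQuadGo (c : Char) (k : Nat) : List Char → List Char
  | [] => List.replicate (k % 4) c
  | a :: t =>
    if a = c then pvQuadGo c (k + 1) t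
    else List.replicate (k % 4) c ++ a :: pvQuadGo c 0 t

def RemoveExcessiveSpacing_alt (text : String) : String :=
  let t1 := pvCollapseGo ' ' false text.toList
  let t2 := pvCollapseGo '\n' false t1
  let t3 := pvQuadGo '.' 0 t2
  let t4 := pvQuadGo '-' 0 t3
  String.ofList t4

-- ===== PRECONDITION & SPEC =====
def Spec_RemoveExcessiveSpacing (text : String) (out : String) : Prop := out = RemoveExcessiveSpacing_alt text
instance (text : String) (out : String) : Decidable (Spec_RemoveExcessiveSpacing text out) := by unfold Spec_RemoveExcessiveSpacing; infer_instance

-- ===== CLAIM (what is proved, stated in full; the proofs are below) =====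
def Claim_equal_RemoveExcessiveSpacing : Prop := ∀ (text : String), Dom_RemoveExcessiveSpacing text → Spec_RemoveExcessiveSpacing text (RemoveExcessiveSpacing text)

-- ===== LEMMAS AND PROOFS =====

theorem collapseGo_cons_self (c : Char) (prev : Bool) (t : List Char) :
    pvCollapseGo c prev (c :: t) =
      if prev then pvCollapseGo c true t else c :: pvCollapseGo c true t := by
  simp [pvCollapseGo]

theorem collapseGo_cons_ne (c a : Char) (prev : Bool) (t : List Char) (ha : a ≠ c) :
    pvCollapseGo c prev (a :: t) = a :: pvCollapseGo c false t := by
  simp [pvCollapseGo, ha]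

theorem quadGo_cons_self (c : Char) (k : Nat) (t : List Char) :
    pvQuadGo c k (c :: t) = pvQuadGo c (k + 1) t := by
  simp [pvQuadGo]

theorem quadGo_cons_ne (c a : Char) (k : Nat) (t : List Char) (ha : a ≠ c) :
    pvQuadGo c k (a :: t) = List.replicate (k % 4) c ++ a :: pvQuadGo c 0 t := by
  simp [pvQuadGo, ha]

-- collapsing: one replace pass is invisible to pvCollapseGo
theorem collapse_rep (c : Char) :
    ∀ (n : Nat) (s : List Char), s.length ≤ n → ∀ prev,
      pvCollapseGo c prev (pvRep [c, c] [c] s) = pvCollapseGo c prev s := by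
  intro n
  induction n with
  | zero =>
    intro s h prev
    have : s = [] := by cases s <;> simp_all
    subst this; simp [pvRep]
  | succ n ih =>
    intro s h prev
    cases s with
    | nil => simp [pvRep]
    | cons a t =>
      by_cases hp : ([c, c]).isPrefixOf (a :: t) = true
      · obtain ⟨u, hu⟩ := List.isPrefixOf_iff_prefix.mp hp
        simp only [List.cons_append, List.nil_append, List.cons.injEq] at hu
        obtain ⟨ha, ht⟩ := hu
        subst ha
        subst ht
        rw [pvRep, if_pos hp]
        have hd : List.drop ([c, c].length - 1) (c :: u) = u := by simp
        rw [hd]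
        have hrec := ih u (by simp at h; omega) true
        rw [List.singleton_append, collapseGo_cons_self, hrec,
            collapseGo_cons_self, collapseGo_cons_self]
        simp
      · rw [pvRep, if_neg hp]
        by_cases ha : a = c
        · subst ha
          rw [collapseGo_cons_self, collapseGo_cons_self,
              ih t (by simp at h; omega) true]
        · rw [collapseGo_cons_ne c a _ _ ha, collapseGo_cons_ne c a _ _ ha,
              ih t (by simp at h; omega) false]

-- a string with no c-pair is a fixpoint of pvCollapseGo
theorem collapse_id (c : Char) :
    ∀ (s : List Char), ¬([c, c] <:+: s) → ∀ prev, (prev = true → s.head? ≠ some c) →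
      pvCollapseGo c prev s = s := by
  intro s
  induction s with
  | nil => intro _ prev _; rfl
  | cons a t ih =>
    intro hin prev hprev
    have htin : ¬([c, c] <:+: t) := fun h => hin (List.infix_cons h)
    by_cases ha : a = c
    · subst ha
      have hpf : prev = false := by
        cases prev
        · rfl
        · exact absurd rfl (hprev rfl)
      subst hpf
      have hth : t.head? ≠ some a := by
        intro hh
        cases t with
        | nil => simp at hh
        | cons b v =>
          simp at hh
          subst hh
          exact hin ⟨[], v, by simp⟩
      rw [collapseGo_cons_self, if_neg (by simp : ¬((false : Bool) = true)),
          ih htin true (fun _ => hth)]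
    · rw [collapseGo_cons_ne c a _ _ ha, ih htin false (by simp)]

theorem whilePair_eq_collapse (c : Char) (hne : ([c, c] : List Char) ≠ [])
    (hlt : ([c] : List Char).length < ([c, c] : List Char).length) :
    ∀ (n : Nat) (s : List Char), s.length ≤ n →
      pvWhileReplace [c, c] [c] hne hlt s = pvCollapseGo c false s := by
  intro n
  induction n with
  | zero =>
    intro s h
    have hs : s = [] := by cases s <;> simp_all
    subst hs
    rw [pvWhileReplace,
        dif_neg (by rw [(PySem.Chars.isIn_eq_false_iff [c, c] []).mpr (by simp)]; simp)]
    rfl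
  | succ n ih =>
    intro s h
    rw [pvWhileReplace]
    by_cases hin : PySem.Chars.isIn [c, c] s = true
    · rw [dif_pos hin, pvReplace_eq_pvRep _ _ _ hne]
      have hlen := pvRep_length_lt [c, c] [c] hlt s ((PySem.Chars.isIn_iff_infix _ _).mp hin)
      rw [ih _ (by omega)]
      exact collapse_rep c s.length s le_rfl false
    · rw [dif_neg hin]
      have := (PySem.Chars.isIn_eq_false_iff _ _).mp (by simpa using hin)
      exact (collapse_id c s this false (by simp)).symm

-- quads: the counter only matters mod 4
theorem quad_mod (c : Char) :
    ∀ (s : List Char) (k : Nat), pvQuadGo c (k + 4) s = pvQuadGo c k s := by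
  intro s
  induction s with
  | nil => intro k; simp [pvQuadGo, Nat.add_mod_right]
  | cons a t ih =>
    intro k
    by_cases ha : a = c
    · simp only [pvQuadGo, if_pos ha]
      have : k + 4 + 1 = k + 1 + 4 := by omega
      rw [this, ih]
    · simp only [pvQuadGo, if_neg ha, Nat.add_mod_right]

-- one 4-deletion pass is invisible to pvQuadGo
theorem quad_rep (c : Char) :
    ∀ (n : Nat) (s : List Char), s.length ≤ n → ∀ k,
      pvQuadGo c k (pvRep [c, c, c, c] [] s) = pvQuadGo c k s := by
  intro n
  induction n with
  | zero =>
    intro s h k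
    have : s = [] := by cases s <;> simp_all
    subst this; simp [pvRep]
  | succ n ih =>
    intro s h k
    cases s with
    | nil => simp [pvRep]
    | cons a t =>
      by_cases hp : ([c, c, c, c]).isPrefixOf (a :: t) = true
      · obtain ⟨u, hu⟩ := List.isPrefixOf_iff_prefix.mp hp
        have hs : a :: t = c :: c :: c :: c :: u := by simpa using hu.symm
        have ht : t = c :: c :: c :: u := by
          simpa using congrArg List.tail hs
        have hd : List.drop ([c, c, c, c].length - 1) t = u := by simp [ht]
        rw [pvRep, if_pos hp, hd, List.nil_append]
        have hlen : u.length ≤ n := by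
          simp only [List.length_cons] at h
          simp only [ht, List.length_cons] at h
          omega
        rw [ih u hlen k, hs, quadGo_cons_self, quadGo_cons_self,
            quadGo_cons_self, quadGo_cons_self]
        exact (quad_mod c u k).symm
      · rw [pvRep, if_neg hp]
        by_cases ha : a = c
        · subst ha
          rw [quadGo_cons_self, quadGo_cons_self, ih t (by simp at h; omega) (k + 1)]
        · rw [quadGo_cons_ne c a _ _ ha, quadGo_cons_ne c a _ _ ha,
              ih t (by simp at h; omega) 0]

-- a string with no c-quad is a fixpoint of pvQuadGo
theorem quad_id (c : Char) :
    ∀ (s : List Char) (k : Nat), k ≤ 3 →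
      ¬([c, c, c, c] <:+: (List.replicate k c ++ s)) →
      pvQuadGo c k s = List.replicate k c ++ s := by
  intro s
  induction s with
  | nil =>
    intro k hk _
    simp [pvQuadGo, Nat.mod_eq_of_lt (by omega : k < 4)]
  | cons a t ih =>
    intro k hk hin
    by_cases ha : a = c
    · subst ha
      have hrepl : List.replicate k a ++ a :: t = List.replicate (k + 1) a ++ t := by
        simp [List.replicate_succ']
      have hk3 : k ≤ 2 := by
        by_contra hgt
        have : k = 3 := by omega
        subst this
        exact hin ⟨[], t, by simp [List.replicate_succ]⟩
      rw [quadGo_cons_self, ih (k + 1) (by omega) (by rwa [← hrepl]), hrepl]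
    · rw [quadGo_cons_ne c a _ _ ha]
      have hkk : ¬([c, c, c, c] <:+: a :: t) := by
        intro hh
        obtain ⟨p, q, hpq⟩ := hh
        exact hin ⟨List.replicate k c ++ p, q, by simp [← hpq]⟩
      have h0 : ¬([c, c, c, c] <:+: t) := fun hh => hkk (List.infix_cons hh)
      rw [ih 0 (by omega) (by simpa using h0)]
      rw [Nat.mod_eq_of_lt (by omega : k < 4)]
      simp

theorem whileQuad_eq_quad (c : Char) (hne : ([c, c, c, c] : List Char) ≠ [])
    (hlt : ([] : List Char).length < ([c, c, c, c] : List Char).length) :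
    ∀ (n : Nat) (s : List Char), s.length ≤ n →
      pvWhileReplace [c, c, c, c] [] hne hlt s = pvQuadGo c 0 s := by
  intro n
  induction n with
  | zero =>
    intro s h
    have hs : s = [] := by cases s <;> simp_all
    subst hs
    rw [pvWhileReplace,
        dif_neg (by rw [(PySem.Chars.isIn_eq_false_iff [c, c, c, c] []).mpr (by simp)]; simp)]
    simp [pvQuadGo]
  | succ n ih =>
    intro s h
    rw [pvWhileReplace]
    by_cases hin : PySem.Chars.isIn [c, c, c, c] s = true
    · rw [dif_pos hin, pvReplace_eq_pvRep _ _ _ hne]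
      have hlen := pvRep_length_lt [c, c, c, c] [] hlt s ((PySem.Chars.isIn_iff_infix _ _).mp hin)
      rw [ih _ (by omega)]
      exact quad_rep c s.length s le_rfl 0
    · rw [dif_neg hin]
      have := (PySem.Chars.isIn_eq_false_iff _ _).mp (by simpa using hin)
      exact (quad_id c s 0 (by omega) (by simpa using this)).symm

-- ===== VERDICT (by name: the statement is the Claim_ definition above) =====
theorem RemoveExcessiveSpacing_spec : Claim_equal_RemoveExcessiveSpacing := by
  intro text _
  unfold Spec_RemoveExcessiveSpacing RemoveExcessiveSpacing RemoveExcessiveSpacing_alt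
  simp only
  rw [whilePair_eq_collapse ' ' (by simp) (by simp) _ _ le_rfl,
      whilePair_eq_collapse '\n' (by simp) (by simp) _ _ le_rfl,
      whileQuad_eq_quad '.' (by simp) (by simp) _ _ le_rfl,
      whileQuad_eq_quad '-' (by simp) (by simp) _ _ le_rfl]
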